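-- pv_equiv track=rewrite | github.com/yesongO/coding_test | 프로그래머스/1/135808. 과일 장수/과일 장수.py | solution
-- ===== SOURCE A (Python) =====
-- from collections import deque
--
-- def solution(k, m, score):
--     apple_sorted_queue = deque(sorted(score, reverse=True))
--     result = 0
--
--     while len(apple_sorted_queue) >= m:
--         for i in range(m):
--             apple_arr = []
--             apple_arr.append(apple_sorted_queue.popleft())
--         min_val = min(apple_arr)
--         result += min_val * m
--
--     return result
-- ===== SOURCE B (Python) =====
-- def solution(k, m, score):
--     s = sorted(score, reverse=True)
--     total = 0
--     i = m - 1
--     while i < len(s):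
--         total += s[i]
--         i += m
--     return total * m
-- ===== Notes on version B (the rewrite author's own statement) =====
-- stated objective: simpler
-- what changed: Replaces A's deque popping loop with per-group min by a single strided index walk over the descending-sorted list (each full group's minimum sits at index j*m-1), multiplying the summed minima by m once at the end.
import Mathlib
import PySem

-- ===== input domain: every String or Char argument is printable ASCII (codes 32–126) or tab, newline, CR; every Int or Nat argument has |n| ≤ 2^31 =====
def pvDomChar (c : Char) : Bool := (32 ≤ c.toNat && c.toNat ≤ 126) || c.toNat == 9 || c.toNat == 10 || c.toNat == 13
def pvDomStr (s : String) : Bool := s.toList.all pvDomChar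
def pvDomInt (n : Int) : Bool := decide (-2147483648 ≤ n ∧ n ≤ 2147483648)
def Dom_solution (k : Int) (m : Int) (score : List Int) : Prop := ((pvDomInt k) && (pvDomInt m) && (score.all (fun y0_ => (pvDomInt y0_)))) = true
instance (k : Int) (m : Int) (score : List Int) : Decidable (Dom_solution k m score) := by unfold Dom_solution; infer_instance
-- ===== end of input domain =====

-- B changes the algorithm (strided index walk instead of deque popping with per-group min); objective: simpler.
-- A raises NameError for m ≤ 0 (apple_arr is never assigned); those inputs are outside Pre_solution.

-- ===== PORT A =====
-- the inner 'for i in range(m)' loop: pops n elements off the front of the queue,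
-- returning (last popped element, remaining queue); none ⇔ the loop body never ran
-- (n = 0), where Python's 'min(apple_arr)' raises NameError.
def forPopA : Nat → List Int → Option (Int × List Int)
  | 0, _ => none
  | _+1, [] => none
  | 1, x :: q => some (x, q)
  | n+2, _ :: q => forPopA (n+1) q

theorem forPopA_length : ∀ (n : Nat) (q q' : List Int) (x : Int),
    forPopA n q = some (x, q') → q'.length < q.length := by
  intro n
  induction n using Nat.strong_induction_on with
  | _ n ih =>
    intro q q' x h
    match n, q with
    | 0, _ => simp [forPopA] at h
    | _+1, [] => simp [forPopA] at h
    | 1, y :: q =>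
      simp [forPopA] at h
      simp [h.2.symm]
    | n+2, y :: q =>
      simp only [forPopA] at h
      have := ih (n+1) (by omega) q q' x h
      simp; omega

-- the outer 'while len(queue) >= m' loop of A
def loopA (m : Int) (q : List Int) (result : Int) : Int :=
  if m ≤ (q.length : Int) then
    match hp : forPopA m.toNat q with
    | none => result          -- Python raises NameError here (only reachable for m ≤ 0)
    | some (last, q') => loopA m q' (result + last * m)
  else result
termination_by q.length
decreasing_by exact forPopA_length _ _ _ _ hp

def solution (k : Int) (m : Int) (score : List Int) : Int :=
  loopA m (PySem.List.sorted score (fun x => x) true) 0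

-- ===== PORT B =====
-- B's 'while i < len(s)' loop; the '1 ≤ m' conjunct only makes the recursion total
-- (Python B diverges for m ≤ 0, outside Pre_solution).
def loopB (m : Int) (s : List Int) (i : Int) (total : Int) : Int :=
  if 0 < (s.length : Int) - i ∧ 1 ≤ m then
    loopB m s (i + m) (total + PySem.List.pyGetD s i 0)
  else total
termination_by ((s.length : Int) - i).toNat
decreasing_by omega

def solution_alt (k : Int) (m : Int) (score : List Int) : Int :=
  let s := PySem.List.sorted score (fun x => x) true
  loopB m s (m - 1) 0 * m

-- ===== PRECONDITION & SPEC =====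
-- Pre_ excludes m ≤ 0, where A raises NameError (apple_arr never assigned).
def Pre_solution (k : Int) (m : Int) (score : List Int) : Prop := 1 ≤ m
instance (k : Int) (m : Int) (score : List Int) : Decidable (Pre_solution k m score) := by unfold Pre_solution; infer_instance
def pvWitness_solution : Int × Int × List Int := (4, 3, [1, 2, 3, 1, 2, 3, 1])

def Spec_solution (k : Int) (m : Int) (score : List Int) (out : Int) : Prop := out = solution_alt k m score
instance (k : Int) (m : Int) (score : List Int) (out : Int) : Decidable (Spec_solution k m score out) := by unfold Spec_solution; infer_instance

-- ===== CLAIM (what is proved, stated in full; the proofs are below) =====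
def Claim_equal_solution : Prop := ∀ (k : Int) (m : Int) (score : List Int), Dom_solution k m score → Pre_solution k m score → Spec_solution k m score (solution k m score)

-- ===== LEMMAS AND PROOFS =====

theorem forPopA_spec : ∀ (n : Nat) (q : List Int), n + 1 ≤ q.length →
    forPopA (n + 1) q = some (q.getD n 0, q.drop (n + 1)) := by
  intro n
  induction n with
  | zero => intro q h; match q with
            | x :: q => simp [forPopA]
  | succ n ih =>
    intro q h
    match q with
    | x :: q =>
      simp only [forPopA]
      rw [ih q (by simpa using h)]
      simp

theorem loopB_acc (m : Int) : ∀ (s : List Int) (i a t : Int),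
    loopB m s i (a + t) = a + loopB m s i t := by
  intro s i
  induction hi : ((s.length : Int) - i).toNat using Nat.strong_induction_on generalizing i with
  | _ n ih =>
    intro a t
    rw [loopB]; conv_rhs => rw [loopB]
    by_cases h : 0 < (s.length : Int) - i ∧ 1 ≤ m
    · rw [if_pos h, if_pos h]
      rw [show a + t + PySem.List.pyGetD s i 0 = a + (t + PySem.List.pyGetD s i 0) by ring]
      exact ih _ (by omega) (i + m) rfl _ _
    · rw [if_neg h, if_neg h]

theorem loopB_drop (m : Int) (hm : 1 ≤ m) : ∀ (s : List Int) (i t : Int), 0 ≤ i →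
    loopB m s (i + m) t = loopB m (s.drop m.toNat) i t := by
  intro s i
  induction hi : ((s.length : Int) - i).toNat using Nat.strong_induction_on generalizing i with
  | _ n ih =>
    intro t h0
    rw [loopB]; conv_rhs => rw [loopB]
    have hd : (s.drop m.toNat).length = s.length - m.toNat := by simp
    have hcond : (0 < (s.length : Int) - (i + m) ∧ 1 ≤ m) ↔
        (0 < ((s.drop m.toNat).length : Int) - i ∧ 1 ≤ m) := by
      constructor <;> (intro ⟨h1, h2⟩; exact ⟨by omega, h2⟩)
    by_cases hc : 0 < (s.length : Int) - (i + m) ∧ 1 ≤ m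
    · rw [if_pos hc, if_pos (hcond.mp hc)]
      have hget : PySem.List.pyGetD s (i + m) 0 = PySem.List.pyGetD (s.drop m.toNat) i 0 := by
        rw [PySem.List.pyGetD_eq_getElem (h0 := by omega) (h1 := by omega),
            PySem.List.pyGetD_eq_getElem (h0 := h0) (h1 := by push_cast; omega)]
        simp only [List.getElem_drop]
        congr 1
        omega
      rw [hget]
      exact ih _ (by omega) (i + m) rfl _ (by omega)
    · rw [if_neg hc, if_neg (fun h => hc (hcond.mpr h))]

theorem loopA_eq (m : Int) (hm : 1 ≤ m) : ∀ (q : List Int) (r : Int),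
    loopA m q r = r + loopB m q (m - 1) 0 * m := by
  intro q
  induction hq : q.length using Nat.strong_induction_on generalizing q with
  | _ n ih =>
    intro r
    rw [loopA]; conv_rhs => rw [loopB]
    by_cases hc : m ≤ (q.length : Int)
    · rw [if_pos hc]
      have hm1 : m.toNat = (m.toNat - 1) + 1 := by omega
      have hlt : (m.toNat - 1) + 1 ≤ q.length := by omega
      have hpop : forPopA m.toNat q = some (q.getD (m.toNat - 1) 0, q.drop m.toNat) := by
        rw [hm1]; rw [forPopA_spec (m.toNat - 1) q hlt]; rw [← hm1]
      rw [hpop]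
      simp only []
      have hrec := ih (q.drop m.toNat).length (by simp; omega) (q.drop m.toNat) rfl
        (r + q.getD (m.toNat - 1) 0 * m)
      rw [hrec]
      rw [if_pos (show 0 < (q.length : Int) - (m - 1) ∧ 1 ≤ m from ⟨by omega, hm⟩)]
      rw [show (m - 1) + m = (m - 1) + m from rfl,
          loopB_drop m hm q (m - 1) (0 + PySem.List.pyGetD q (m - 1) 0) (by omega)]
      have hgd : PySem.List.pyGetD q (m - 1) 0 = q.getD (m.toNat - 1) 0 := by
        have e : m - 1 = (((m.toNat - 1 : Nat) : Nat) : Int) := by omega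
        rw [e, PySem.List.pyGetD_natCast]
      rw [hgd]
      rw [show (0 : Int) + q.getD (m.toNat - 1) 0 = q.getD (m.toNat - 1) 0 + 0 by ring]
      rw [loopB_acc m (q.drop m.toNat) (m - 1) (q.getD (m.toNat - 1) 0) 0]
      ring
    · rw [if_neg hc, if_neg (by omega)]
      ring

-- ===== VERDICT (by name: the statement is the Claim_ definition above) =====
theorem solution_spec : Claim_equal_solution := by
  intro k m score _ hpre
  unfold Spec_solution solution solution_alt
  simpa using loopA_eq m hpre (PySem.List.sorted score (fun x => x) true) 0
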